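-- pv_equiv track=rewrite | github.com/SuchismitaDhal/Solutions-dailyInterviewPro | 2019/12-December/12.17.py | isexp
-- ===== SOURCE A (Python) =====
-- def ispure(s: str) -> bool:
--     if len(s) == 0:
--         return True
--     return s.isdigit()
--
-- def isdec(s: str) -> bool:
--     i = 0
--     for c in s:
--         if c == '.':
--             break
--         i += 1
--
--     if i == len(s):
--         return False
--
--     l = s[0:i]
--     if i != len(s)-1:
--         r = s[i+1: len(s)]
--     else:
--         r = ""
--     if len(r) == 0 and len(l) == 0:
--         return False
--     return ispure(l) and ispure(r)
--
-- def isexp(s: str) -> bool: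
--     i = 0
--     for c in s:
--         if c == 'e':
--             break
--         i += 1
--
--     if i == len(s):
--         return False
--
--     l = s[0:i]
--     r = s[i+1:len(s)]
--
--     if len(r) > 0:
--         if r[0] == '+' or r[0] == '-':
--             r = r[1:len(r)]
--     if len(l) == 0 or len(r) == 0:
--         return False
--     return (ispure(l) or isdec(l)) and ispure(r)
-- ===== SOURCE B (Python) =====
-- def isexp(s: str) -> bool:
--     # One left-to-right scan with a small state machine instead of split-on-'e'
--     # plus split-on-'.'/helper string checks.
--     seen_digit = False   # mantissa has a digit
--     seen_dot = False     # mantissa already has a '.'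
--     seen_e = False       # we are past the (single) 'e'
--     exp_digit = False    # exponent has a digit
--     sign_ok = False      # a '+'/'-' is still allowed (only as first exponent char)
--     for c in s:
--         if not seen_e:
--             if c.isdigit():
--                 seen_digit = True
--             elif c == '.':
--                 if seen_dot:
--                     return False
--                 seen_dot = True
--             elif c == 'e':
--                 if not seen_digit:
--                     return False
--                 seen_e = True
--                 sign_ok = True
--             else:
--                 return False
--         else:
--             if c.isdigit():
--                 exp_digit = True
--                 sign_ok = False
--             elif (c == '+' or c == '-') and sign_ok:
--                 sign_ok = False
--             else:
--                 return False
--     return seen_e and exp_digit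
-- ===== Notes on version B (the rewrite author's own statement) =====
-- stated objective: simpler
-- what changed: Replaced A's find-'e'/slice, then find-'.'/slice helper-string checks (ispure/isdec) by a single left-to-right state-machine scan with five boolean flags and early rejection.
import Mathlib
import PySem

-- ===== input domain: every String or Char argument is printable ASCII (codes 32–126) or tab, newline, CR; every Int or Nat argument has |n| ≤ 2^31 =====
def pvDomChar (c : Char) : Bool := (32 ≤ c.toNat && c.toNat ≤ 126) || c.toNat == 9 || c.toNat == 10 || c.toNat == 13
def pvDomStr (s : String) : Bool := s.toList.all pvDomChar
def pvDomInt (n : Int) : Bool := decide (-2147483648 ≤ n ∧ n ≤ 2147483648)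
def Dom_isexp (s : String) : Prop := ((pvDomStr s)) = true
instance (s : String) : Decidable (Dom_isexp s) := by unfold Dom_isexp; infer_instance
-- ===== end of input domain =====

-- B replaces A's split-at-'e' / split-at-'.' helper-string checks by a single
-- left-to-right state-machine scan (objective: simpler decomposition, same value).

-- ===== PORT A =====
-- 'i = 0; for c in s: if c == t: break; i += 1'  (index of first t, or length)
def pvIdxBreak (t : Char) : List Char → Nat
  | [] => 0
  | c :: cs => if c = t then 0 else pvIdxBreak t cs + 1

-- ispure(s)
def pvIspure (cs : List Char) : Bool :=
  if cs.length = 0 then true else PySem.Chars.strIsdigit cs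

-- isdec(s)
def pvIsdec (cs : List Char) : Bool :=
  let i := pvIdxBreak '.' cs
  if i = cs.length then false
  else
    let l := PySem.List.slice cs (some 0) (some (i : Int))
    let r := if i ≠ cs.length - 1 then
               PySem.List.slice cs (some ((i : Int) + 1)) (some (cs.length : Int))
             else []
    if r.length = 0 ∧ l.length = 0 then false
    else pvIspure l && pvIspure r

-- isexp(s), on the character list
def pvIsexpA (cs : List Char) : Bool :=
  let i := pvIdxBreak 'e' cs
  if i = cs.length then false
  else
    let l := PySem.List.slice cs (some 0) (some (i : Int))
    let r := PySem.List.slice cs (some ((i : Int) + 1)) (some (cs.length : Int))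
    let r := if r.length > 0 then
               (if PySem.List.pyGet? r 0 = some '+' ∨ PySem.List.pyGet? r 0 = some '-' then
                  PySem.List.slice r (some 1) (some (r.length : Int))
                else r)
             else r
    if l.length = 0 ∨ r.length = 0 then false
    else (pvIspure l || pvIsdec l) && pvIspure r

def isexp (s : String) : Bool := pvIsexpA s.toList

-- ===== PORT B =====
-- the loop of Source B, state (seen_digit, seen_dot, seen_e, exp_digit, sign_ok)
def pvRun (sd dot se ed sk : Bool) : List Char → Bool
  | [] => se && ed
  | c :: cs =>
    if !se then
      if PySem.Chars.isdigit c then pvRun true dot se ed sk cs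
      else if c = '.' then (if dot then false else pvRun sd true se ed sk cs)
      else if c = 'e' then (if !sd then false else pvRun sd dot true ed true cs)
      else false
    else
      if PySem.Chars.isdigit c then pvRun sd dot se true false cs
      else if (c == '+' || c == '-') && sk then pvRun sd dot se ed false cs
      else false

def isexp_alt (s : String) : Bool := pvRun false false false false false s.toList

-- ===== PRECONDITION & SPEC =====
def Spec_isexp (s : String) (out : Bool) : Prop := out = isexp_alt s
instance (s : String) (out : Bool) : Decidable (Spec_isexp s out) := by unfold Spec_isexp; infer_instance

-- ===== CLAIM (what is proved, stated in full; the proofs are below) =====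
def Claim_equal_isexp : Prop := ∀ (s : String), Dom_isexp s → Spec_isexp s (isexp s)

-- ===== LEMMAS AND PROOFS =====

lemma pv_digit_ne_dot {c : Char} (h : PySem.Chars.isdigit c = true) : c ≠ '.' := by
  intro h'; subst h'; simp [PySem.Chars.isdigit] at h

lemma pvIspure_eq (x : List Char) : pvIspure x = x.all PySem.Chars.isdigit := by
  cases x <;> simp [pvIspure, PySem.Chars.strIsdigit]

lemma pv_allp_no_dot : ∀ (x : List Char), '.' ∉ x →
    (x.all (fun c => PySem.Chars.isdigit c || c == '.')) = x.all PySem.Chars.isdigit := by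
  intro x h
  induction x with
  | nil => rfl
  | cons c x ih =>
    simp only [List.mem_cons, not_or] at h
    have hcd : c ≠ '.' := fun h' => h.1 h'.symm
    have : (c == '.') = false := by simp [hcd]
    simp [this, ih h.2]

lemma pv_any_of_all {x : List Char} (h : x.all PySem.Chars.isdigit = true) :
    x.any PySem.Chars.isdigit = !x.isEmpty := by
  cases x with
  | nil => rfl
  | cons c x => simp_all

-- pvIdxBreak facts
lemma pvIdxBreak_of_not_mem {t : Char} {cs : List Char} (h : t ∉ cs) :
    pvIdxBreak t cs = cs.length := by
  induction cs with
  | nil => rfl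
  | cons c cs ih =>
    simp only [List.mem_cons, not_or] at h
    simp [pvIdxBreak, Ne.symm h.1, ih h.2]

lemma pvIdxBreak_decomp {t : Char} {cs : List Char} (h : t ∈ cs) :
    ∃ a b, cs = a ++ t :: b ∧ t ∉ a ∧ pvIdxBreak t cs = a.length := by
  induction cs with
  | nil => simp at h
  | cons c cs ih =>
    by_cases hc : c = t
    · exact ⟨[], cs, by simp [hc], by simp, by simp [pvIdxBreak, hc]⟩
    · have h' : t ∈ cs := by
        rcases List.mem_cons.mp h with h' | h'
        · exact absurd h'.symm hc
        · exact h'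
      rcases ih h' with ⟨a, b, rfl, ha, hi⟩
      exact ⟨c :: a, b, rfl, by simp [ha, Ne.symm hc], by simp [pvIdxBreak, hc, hi]⟩

-- slice computations used by the A port
lemma pv_slice_take (a : List Char) (t : Char) (b : List Char) :
    PySem.List.slice (a ++ t :: b) (some 0) (some ((a.length : Nat) : Int)) = a := by
  rw [PySem.List.slice_zero_start, PySem.List.slice_to_natCast, List.take_left]

lemma pv_slice_drop (a : List Char) (t : Char) (b : List Char) :
    PySem.List.slice (a ++ t :: b) (some ((a.length : Int) + 1))
      (some (((a ++ t :: b).length : Nat) : Int)) = b := by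
  rw [show ((a.length : Int) + 1) = (((a.length + 1 : Nat)) : Int) by push_cast; ring,
      PySem.List.slice_natCast,
      show a ++ t :: b = (a ++ [t]) ++ b by simp,
      show a.length + 1 = (a ++ [t]).length by simp,
      List.drop_left]
  refine List.take_of_length_le ?_
  simp only [List.length_append, List.length_cons, List.length_nil]
  omega

lemma pv_slice_tail (c : Char) (b : List Char) :
    PySem.List.slice (c :: b) (some 1) (some (((c :: b).length : Nat) : Int)) = b := by
  rw [show (1 : Int) = ((1 : Nat) : Int) by simp, PySem.List.slice_natCast]
  simp

-- the exponent phase of pvRun once no sign is allowed any more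
lemma pvRun_exp_nosign : ∀ (cs : List Char) (sd dot ed : Bool),
    pvRun sd dot true ed false cs = ((ed || !cs.isEmpty) && cs.all PySem.Chars.isdigit) := by
  intro cs
  induction cs with
  | nil => intro sd dot ed; simp [pvRun]
  | cons c cs ih =>
    intro sd dot ed
    by_cases hc : PySem.Chars.isdigit c = true
    · simp [pvRun, hc, ih]
    · simp only [Bool.not_eq_true] at hc
      simp [pvRun, hc]

-- the exponent part, in A's shape
def pvAexp : List Char → Bool
  | [] => false
  | c :: cs =>
    if c = '+' ∨ c = '-' then (!cs.isEmpty && cs.all PySem.Chars.isdigit)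
    else PySem.Chars.isdigit c && cs.all PySem.Chars.isdigit

lemma pvRun_exp (cs : List Char) (sd dot : Bool) :
    pvRun sd dot true false true cs = pvAexp cs := by
  cases cs with
  | nil => simp [pvRun, pvAexp]
  | cons c cs =>
    by_cases hc : PySem.Chars.isdigit c = true
    · have hns : ¬ (c = '+' ∨ c = '-') := by
        rintro (rfl | rfl) <;> simp [PySem.Chars.isdigit] at hc
      simp [pvRun, pvAexp, hc, hns, pvRun_exp_nosign]
    · simp only [Bool.not_eq_true] at hc
      by_cases hs : c = '+' ∨ c = '-'
      · have hbeq : (c == '+' || c == '-') = true := by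
          rcases hs with rfl | rfl <;> simp
        simp [pvRun, pvAexp, hc, hs, hbeq, pvRun_exp_nosign]
      · have hbeq : (c == '+' || c == '-') = false := by
          simp only [not_or] at hs
          simp [hs.1, hs.2]
        simp [pvRun, pvAexp, hc, hs, hbeq]

-- the mantissa phase never accepts when no 'e' follows
lemma pvRun_no_e : ∀ (cs : List Char) (sd dot ed sk : Bool), 'e' ∉ cs →
    pvRun sd dot false ed sk cs = false := by
  intro cs
  induction cs with
  | nil => intro sd dot ed sk _; simp [pvRun]
  | cons c cs ih =>
    intro sd dot ed sk h
    simp only [List.mem_cons, not_or] at h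
    by_cases hc : PySem.Chars.isdigit c = true
    · simp [pvRun, hc, ih _ _ _ _ h.2]
    · simp only [Bool.not_eq_true] at hc
      by_cases hd : c = '.'
      · simp [pvRun, hd, ih _ _ _ _ h.2]
      · simp [pvRun, hc, hd, Ne.symm h.1]

-- abstracted mantissa scan of pvRun
def pvMS (sd dot : Bool) : List Char → Option Bool
  | [] => some sd
  | c :: cs =>
    if PySem.Chars.isdigit c then pvMS true dot cs
    else if c = '.' then (if dot then none else pvMS sd true cs)
    else none

lemma pvRun_split : ∀ (l r : List Char) (sd dot : Bool), 'e' ∉ l →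
    pvRun sd dot false false false (l ++ 'e' :: r) =
      ((pvMS sd dot l).getD false && pvAexp r) := by
  intro l
  induction l with
  | nil =>
    intro r sd dot _
    have hde : PySem.Chars.isdigit 'e' = false := by decide
    cases sd <;> simp [pvRun, pvMS, hde, pvRun_exp]
  | cons c l ih =>
    intro r sd dot h
    simp only [List.mem_cons, not_or] at h
    by_cases hc : PySem.Chars.isdigit c = true
    · simp only [List.cons_append]
      rw [show pvRun sd dot false false false (c :: (l ++ 'e' :: r)) =
            pvRun true dot false false false (l ++ 'e' :: r) by simp [pvRun, hc],
          show pvMS sd dot (c :: l) = pvMS true dot l by simp [pvMS, hc]]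
      exact ih r true dot h.2
    · simp only [Bool.not_eq_true] at hc
      by_cases hd : c = '.'
      · subst hd
        cases dot with
        | false =>
          simp only [List.cons_append]
          rw [show pvRun sd false false false false ('.' :: (l ++ 'e' :: r)) =
                pvRun sd true false false false (l ++ 'e' :: r) by simp [pvRun, hc],
              show pvMS sd false ('.' :: l) = pvMS sd true l by simp [pvMS, hc]]
          exact ih r sd true h.2
        | true =>
          simp [pvRun, pvMS, hc]
      · simp [pvRun, pvMS, hc, hd, Ne.symm h.1]

-- characterization of the mantissa scan
lemma pvMS_char : ∀ (l : List Char) (sd dot : Bool),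
    pvMS sd dot l =
      (if (l.all (fun c => PySem.Chars.isdigit c || c == '.')) = true ∧
          l.count '.' + (if dot then 1 else 0) ≤ 1 then
        some (sd || l.any PySem.Chars.isdigit)
       else none) := by
  intro l
  induction l with
  | nil => intro sd dot; cases dot <;> simp [pvMS]
  | cons c l ih =>
    intro sd dot
    by_cases hc : PySem.Chars.isdigit c = true
    · have hne : (c == '.') = false := by simp [pv_digit_ne_dot hc]
      rw [show pvMS sd dot (c :: l) = pvMS true dot l by simp [pvMS, hc], ih]
      by_cases hP : (l.all (fun c => PySem.Chars.isdigit c || c == '.')) = true ∧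
          l.count '.' + (if dot then 1 else 0) ≤ 1
      · rw [if_pos hP, if_pos (by simp [List.count_cons, hne, hc, hP.1, hP.2])]
        simp [hc]
      · rw [if_neg hP, if_neg (by
          rintro ⟨h1, h2⟩
          simp only [List.all_cons, List.count_cons, hne, hc, Bool.true_or,
            Bool.true_and] at h1 h2
          exact hP ⟨h1, by omega⟩)]
    · have hc' : PySem.Chars.isdigit c = false := by simpa using hc
      by_cases hd : c = '.'
      · subst hd
        cases dot with
        | false =>
          rw [show pvMS sd false ('.' :: l) = pvMS sd true l by simp [pvMS, hc'], ih]
          by_cases hP : (l.all (fun c => PySem.Chars.isdigit c || c == '.')) = true ∧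
              l.count '.' + 1 ≤ 1
          · rw [if_pos (by simpa using hP),
                if_pos (by
                  refine ⟨by simp [hP.1], ?_⟩
                  simp only [List.count_cons]
                  simpa using hP.2)]
            simp [hc']
          · rw [if_neg (by simpa using hP), if_neg (by
              rintro ⟨h1, h2⟩
              simp only [List.all_cons, List.count_cons] at h1 h2
              refine hP ⟨by simpa using h1, by simp at h2; omega⟩)]
        | true =>
          rw [show pvMS sd true ('.' :: l) = none by simp [pvMS, hc']]
          rw [if_neg (by
            rintro ⟨_, h2⟩
            simp at h2)]
      · have hne : (c == '.') = false := by simp [hd]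
        rw [show pvMS sd dot (c :: l) = none by simp [pvMS, hc', hd]]
        rw [if_neg (by
          rintro ⟨h1, _⟩
          simp [hc', hne] at h1)]

-- A's mantissa condition equals the scan's verdict
lemma pvMS_char0 (l : List Char) :
    (pvMS false false l).getD false =
      (if (l.all (fun c => PySem.Chars.isdigit c || c == '.')) = true ∧ l.count '.' ≤ 1 then
        l.any PySem.Chars.isdigit
       else false) := by
  rw [pvMS_char]
  by_cases hP : (l.all (fun c => PySem.Chars.isdigit c || c == '.')) = true ∧ l.count '.' ≤ 1
  · rw [if_pos hP, if_pos (by simpa using hP)]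
    simp
  · rw [if_neg hP, if_neg (by simpa using hP)]
    simp

lemma pvAmant_eq (l : List Char) :
    ((!l.isEmpty) && (pvIspure l || pvIsdec l)) = ((pvMS false false l).getD false) := by
  rw [pvMS_char0]
  by_cases hd : '.' ∈ l
  · rcases pvIdxBreak_decomp hd with ⟨a, b, rfl, ha, hi⟩
    have hpd : PySem.Chars.isdigit '.' = false := by decide
    have hr : (if a.length ≠ (a ++ '.' :: b).length - 1 then
                 PySem.List.slice (a ++ '.' :: b) (some ((a.length : Int) + 1))
                   (some (((a ++ '.' :: b).length : Nat) : Int))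
               else []) = b := by
      rcases b with _ | ⟨x, b'⟩
      · rw [if_neg (by simp only [ne_eq, List.length_append, List.length_cons,
                       List.length_nil, Decidable.not_not]; omega)]
      · rw [if_pos (by simp only [ne_eq, List.length_append, List.length_cons]; omega),
            pv_slice_drop]
    have hdec : pvIsdec (a ++ '.' :: b) =
        (if b.length = 0 ∧ a.length = 0 then false else pvIspure a && pvIspure b) := by
      unfold pvIsdec
      simp only [hi]
      rw [if_neg (by simp only [List.length_append, List.length_cons]; omega),
          pv_slice_take, hr]
    have hpure : pvIspure (a ++ '.' :: b) = false := by
      simp [pvIspure_eq, List.all_append, hpd]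
    have hnem : (a ++ '.' :: b).isEmpty = false := by cases a <;> simp
    rw [hdec, hpure, hnem]
    have hca : a.count '.' = 0 := List.count_eq_zero.mpr ha
    by_cases hb : '.' ∈ b
    · have hcb : 0 < b.count '.' := List.count_pos_iff.mpr hb
      have hbnil : b ≠ [] := List.ne_nil_of_mem hb
      have hpb : pvIspure b = false := by
        rw [pvIspure_eq]
        cases hba : b.all PySem.Chars.isdigit with
        | false => rfl
        | true =>
          have := List.all_eq_true.mp hba '.' hb
          simp [hpd] at this
      have hPn : ¬ (((a ++ '.' :: b).all fun c => PySem.Chars.isdigit c || c == '.') = true ∧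
          List.count '.' (a ++ '.' :: b) ≤ 1) := by
        rintro ⟨_, h2⟩
        rw [List.count_append] at h2
        have h3 : List.count '.' ('.' :: b) = List.count '.' b + 1 := by
          simp
        rw [hca, h3] at h2
        omega
      rw [if_neg hPn]
      rw [if_neg (show ¬ (b.length = 0 ∧ a.length = 0) from
            fun h => hbnil (List.length_eq_zero_iff.mp h.1))]
      simp [hpb]
    · have hcb : b.count '.' = 0 := List.count_eq_zero.mpr hb
      have hcond : ((a ++ '.' :: b).all (fun c => PySem.Chars.isdigit c || c == '.')) =
          (a.all PySem.Chars.isdigit && b.all PySem.Chars.isdigit) := by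
        simp [List.all_append, pv_allp_no_dot a ha, pv_allp_no_dot b hb]
      have hcnt : (a ++ '.' :: b).count '.' ≤ 1 := by
        simp [List.count_append, hca, hcb]
      by_cases hA : (a.all PySem.Chars.isdigit && b.all PySem.Chars.isdigit) = true
      · have hA12 := hA
        rw [Bool.and_eq_true] at hA12
        have hPp : (((a ++ '.' :: b).all fun c => PySem.Chars.isdigit c || c == '.') = true ∧
            List.count '.' (a ++ '.' :: b) ≤ 1) := ⟨by rw [hcond]; exact hA, hcnt⟩
        rw [if_pos hPp]
        rw [pvIspure_eq a, pvIspure_eq b, hA12.1, hA12.2]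
        rw [List.any_append]
        simp only [List.any_cons, hpd, Bool.false_or]
        rw [pv_any_of_all hA12.1, pv_any_of_all hA12.2]
        rcases a with _ | ⟨y, a'⟩ <;> rcases b with _ | ⟨z, b''⟩ <;> simp
      · have hA' : (a.all PySem.Chars.isdigit && b.all PySem.Chars.isdigit) = false := by
          simpa using hA
        have hPn : ¬ (((a ++ '.' :: b).all fun c => PySem.Chars.isdigit c || c == '.') = true ∧
            List.count '.' (a ++ '.' :: b) ≤ 1) := by
          rintro ⟨h1, _⟩
          rw [hcond] at h1
          exact hA h1
        rw [if_neg hPn]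
        rw [pvIspure_eq a, pvIspure_eq b]
        split_ifs <;> simp_all
  · have hcnt : l.count '.' = 0 := List.count_eq_zero.mpr hd
    have hdec : pvIsdec l = false := by
      unfold pvIsdec
      rw [pvIdxBreak_of_not_mem hd]
      simp
    rw [hdec, pvIspure_eq, pv_allp_no_dot l hd]
    by_cases hA : l.all PySem.Chars.isdigit = true
    · rw [if_pos ⟨hA, by simp [hcnt]⟩, hA, pv_any_of_all hA]
      simp
    · have hA' : l.all PySem.Chars.isdigit = false := by simpa using hA
      rw [if_neg (by rintro ⟨h, _⟩; exact hA h)]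
      simp [hA']

-- A's exponent handling equals pvAexp (given the pieces around the 'e')
lemma pv_expside (a b : List Char) :
    (if a.length = 0 ∨ (if b.length > 0 then
          (if PySem.List.pyGet? b 0 = some '+' ∨ PySem.List.pyGet? b 0 = some '-' then
             PySem.List.slice b (some 1) (some ((b.length : Nat) : Int)) else b)
        else b).length = 0 then false
     else (pvIspure a || pvIsdec a) &&
       pvIspure (if b.length > 0 then
          (if PySem.List.pyGet? b 0 = some '+' ∨ PySem.List.pyGet? b 0 = some '-' then
             PySem.List.slice b (some 1) (some ((b.length : Nat) : Int)) else b)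
        else b))
    = ((!a.isEmpty && (pvIspure a || pvIsdec a)) && pvAexp b) := by
  rcases b with _ | ⟨c, b'⟩
  · simp [pvAexp]
  · rw [PySem.List.pyGet?_zero_cons]
    rw [if_pos (show (c :: b').length > 0 by simp)]
    by_cases hs : c = '+' ∨ c = '-'
    · have hsome : (some c = some '+' ∨ some c = some '-') := by
        rcases hs with rfl | rfl <;> simp
      rw [if_pos hsome, pv_slice_tail]
      rw [show pvAexp (c :: b') = (!b'.isEmpty && b'.all PySem.Chars.isdigit) by
            simp [pvAexp, hs]]
      rw [pvIspure_eq b']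
      rcases a with _ | ⟨y, a'⟩ <;> rcases b' with _ | ⟨z, b''⟩ <;> simp
    · have hnsome : ¬ (some c = some '+' ∨ some c = some '-') := by
        rintro (h | h)
        · exact hs (Or.inl (Option.some.inj h))
        · exact hs (Or.inr (Option.some.inj h))
      rw [if_neg hnsome]
      rw [show pvAexp (c :: b') = (PySem.Chars.isdigit c && b'.all PySem.Chars.isdigit) by
            simp [pvAexp, hs]]
      rw [pvIspure_eq (c :: b')]
      rcases a with _ | ⟨y, a'⟩ <;> simp

-- the main list-level equivalence
lemma pv_main (cs : List Char) : pvIsexpA cs = pvRun false false false false false cs := by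
  by_cases he : 'e' ∈ cs
  · rcases pvIdxBreak_decomp he with ⟨a, b, rfl, ha, hi⟩
    rw [pvRun_split a b false false ha, ← pvAmant_eq a]
    unfold pvIsexpA
    simp only [hi]
    rw [if_neg (by simp only [List.length_append, List.length_cons]; omega),
        pv_slice_take, pv_slice_drop]
    exact pv_expside a b
  · rw [pvRun_no_e _ _ _ _ _ he]
    unfold pvIsexpA
    rw [pvIdxBreak_of_not_mem he]
    simp

-- ===== VERDICT (by name: the statement is the Claim_ definition above) =====
theorem isexp_spec : Claim_equal_isexp := by
  intro s _
  unfold Spec_isexp isexp isexp_alt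
  exact pv_main s.toList
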